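-- pv_equiv track=rewrite | github.com/RK0429/ModernMath | scripts/site/remove_title_prefixes.py | needs_yaml_quotes
-- ===== SOURCE A (Python) =====
-- def needs_yaml_quotes(title: str) -> bool:
--     """Check if a title needs quotes in YAML."""
--     special_chars = [
--         ":",
--         "{",
--         "}",
--         "[",
--         "]",
--         ",",
--         "&",
--         "*",
--         "#",
--         "?",
--         "|",
--         "-",
--         "<",
--         ">",
--         "=",
--         "!",
--         "%",
--         "@",
--         "\\",
--     ]
--     return any(char in title for char in special_chars)
-- ===== SOURCE B (Python) =====
-- SPECIAL_SET = frozenset(":{}[],&*#?|-<>=!%@\\")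
--
-- def needs_yaml_quotes(title: str) -> bool:
--     """Check if a title needs quotes in YAML."""
--     return any(c in SPECIAL_SET for c in title)
-- ===== Notes on version B (the rewrite author's own statement) =====
-- stated objective: idiomatic
-- what changed: B makes a single pass over the title's characters testing each against a frozenset of special characters, instead of scanning the title once per special character with 19 substring searches.
import Mathlib
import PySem

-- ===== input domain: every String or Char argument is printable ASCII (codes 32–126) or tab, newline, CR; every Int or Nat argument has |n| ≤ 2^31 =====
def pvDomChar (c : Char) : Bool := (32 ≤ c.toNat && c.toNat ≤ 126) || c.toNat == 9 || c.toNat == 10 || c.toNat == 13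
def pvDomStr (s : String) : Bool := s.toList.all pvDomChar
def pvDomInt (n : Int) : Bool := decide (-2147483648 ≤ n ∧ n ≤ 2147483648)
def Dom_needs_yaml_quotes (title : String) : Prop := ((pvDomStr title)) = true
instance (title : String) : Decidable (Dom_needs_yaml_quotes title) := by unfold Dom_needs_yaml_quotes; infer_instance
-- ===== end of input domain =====

-- B makes one pass over the title's characters against a character set, instead of 19 substring scans; idiomatic, same result.

-- ===== PORT A =====
-- A: any(char in title for char in special_chars) — for each special char, a substring scan of title.
def needs_yaml_quotes (title : String) : Bool :=
  let special_chars : List String :=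
    [":", "{", "}", "[", "]", ",", "&", "*", "#", "?", "|", "-", "<", ">", "=", "!", "%", "@", "\\"]
  special_chars.any (fun char => PySem.Str.isIn char title)

-- ===== PORT B =====
-- B: one pass over title's characters, membership in the fixed set of special characters.
def pvSpecialSet : PySem.Set Char :=
  PySem.Set.ofList [':', '{', '}', '[', ']', ',', '&', '*', '#', '?', '|', '-', '<', '>', '=', '!', '%', '@', '\\']

def needs_yaml_quotes_alt (title : String) : Bool :=
  title.toList.any (fun c => decide (c ∈ pvSpecialSet))

-- ===== PRECONDITION & SPEC =====
def Spec_needs_yaml_quotes (title : String) (out : Bool) : Prop := out = needs_yaml_quotes_alt title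
instance (title : String) (out : Bool) : Decidable (Spec_needs_yaml_quotes title out) := by unfold Spec_needs_yaml_quotes; infer_instance

-- ===== CLAIM (what is proved, stated in full; the proofs are below) =====
def Claim_equal_needs_yaml_quotes : Prop := ∀ (title : String), Dom_needs_yaml_quotes title → Spec_needs_yaml_quotes title (needs_yaml_quotes title)

-- ===== LEMMAS AND PROOFS =====

-- a single-char substring test is membership of that character
theorem pv_isIn_single (c : Char) (l : List Char) :
    PySem.Chars.isIn [c] l = l.contains c := by
  rcases h : PySem.Chars.isIn [c] l with _ | _
  · have := (PySem.Chars.isIn_eq_false_iff (sub := [c]) (s := l)).mp h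
    rw [List.singleton_infix_iff] at this
    simp [this]
  · have := (PySem.Chars.isIn_iff_infix (sub := [c]) (s := l)).mp h
    rw [List.singleton_infix_iff] at this
    simp [this]

-- ===== VERDICT (by name: the statement is the Claim_ definition above) =====
theorem needs_yaml_quotes_spec : Claim_equal_needs_yaml_quotes := by
  intro title _
  show needs_yaml_quotes title = needs_yaml_quotes_alt title
  unfold needs_yaml_quotes needs_yaml_quotes_alt pvSpecialSet
  simp only [List.any_cons, List.any_nil, PySem.Str.isIn_eq]
  simp only [show (":":String).toList = [':'] from rfl, show ("{":String).toList = ['{'] from rfl,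
    show ("}":String).toList = ['}'] from rfl, show ("[":String).toList = ['['] from rfl,
    show ("]":String).toList = [']'] from rfl, show (",":String).toList = [','] from rfl,
    show ("&":String).toList = ['&'] from rfl, show ("*":String).toList = ['*'] from rfl,
    show ("#":String).toList = ['#'] from rfl, show ("?":String).toList = ['?'] from rfl,
    show ("|":String).toList = ['|'] from rfl, show ("-":String).toList = ['-'] from rfl,
    show ("<":String).toList = ['<'] from rfl, show (">":String).toList = ['>'] from rfl,
    show ("=":String).toList = ['='] from rfl, show ("!":String).toList = ['!'] from rfl,
    show ("%":String).toList = ['%'] from rfl, show ("@":String).toList = ['@'] from rfl,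
    show ("\\":String).toList = ['\\'] from rfl, pv_isIn_single]
  rw [Bool.eq_iff_iff]
  simp only [List.contains_eq_mem, List.any_eq_true, Bool.or_eq_true, decide_eq_true_eq,
    List.mem_cons, PySem.Set.mem_ofList, Bool.false_eq_true, or_false, List.mem_nil_iff]
  constructor
  · rintro (h|h|h|h|h|h|h|h|h|h|h|h|h|h|h|h|h|h|h) <;> exact ⟨_, h, by simp⟩
  · rintro ⟨c, hc, hmem⟩
    rcases hmem with h|h|h|h|h|h|h|h|h|h|h|h|h|h|h|h|h|h|h <;> subst h <;> tauto
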